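-- pv_equiv track=rewrite | github.com/swsz2024/sw | src/helixfold/data/mmcif_parsing_paddle.py | mmcif_loop_to_list
-- ===== SOURCE A (Python) =====
-- from typing import Any, Mapping, Optional, Sequence, Tuple, List
--
-- MmCIFDict = Mapping[str, Sequence[str]]
--
-- def mmcif_loop_to_list(prefix: str,
--                        parsed_info: MmCIFDict) -> Sequence[Mapping[str, str]]:
--   """Extracts loop associated with a prefix from mmCIF data as a list.
--
--   Reference for loop_ in mmCIF:
--     http://mmcif.wwpdb.org/docs/tutorials/mechanics/pdbx-mmcif-syntax.html
--
--   Args: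
--     prefix: Prefix shared by each of the data items in the loop.
--       e.g. '_entity_poly_seq.', where the data items are _entity_poly_seq.num,
--       _entity_poly_seq.mon_id. Should include the trailing period.
--     parsed_info: A dict of parsed mmCIF data, e.g. _mmcif_dict from a Biopython
--       parser.
--
--   Returns:
--     Returns a list of dicts; each dict represents 1 entry from an mmCIF loop.
--   """
--   cols = []
--   data = []
--   for key, value in parsed_info.items():
--     if key.startswith(prefix):
--       cols.append(key)
--       data.append(value)
--
--   assert all([len(xs) == len(data[0]) for xs in data]), (
--       'mmCIF error: Not all loops are the same length: %s' % cols)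
--
--   return [dict(zip(cols, xs)) for xs in zip(*data)]
-- ===== SOURCE B (Python) =====
-- def mmcif_loop_to_list(prefix: str, parsed_info) -> list:
--   """Same extraction, but transposes by column-major mutation instead of zip(*data)."""
--   cols = []
--   data = []
--   for key, value in parsed_info.items():
--     if key.startswith(prefix):
--       cols.append(key)
--       data.append(value)
--
--   assert all([len(xs) == len(data[0]) for xs in data]), (
--       'mmCIF error: Not all loops are the same length: %s' % cols)
--
--   if not data:
--     return []
--   result = [{} for _ in range(len(data[0]))]
--   for col, values in zip(cols, data):
--     for d, v in zip(result, values):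
--       d[col] = v
--   return result
-- ===== Notes on version B (the rewrite author's own statement) =====
-- stated objective: alternative
-- what changed: B replaces A's row-major transpose (zip(*data) then building each row dict from a transposed tuple) with column-major filling: it preallocates one empty dict per row and mutates them in place, one matching column at a time.
-- outside the precondition, e.g. on mmcif_loop_to_list('', {'a': ['1'], 'b': ['1', '2']}): A raises AssertionError, B raises AssertionError; on mmcif_loop_to_list('a', {'ab': ['1'], 'ac': ['2', '3']}): A raises AssertionError, B raises AssertionError
import Mathlib
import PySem

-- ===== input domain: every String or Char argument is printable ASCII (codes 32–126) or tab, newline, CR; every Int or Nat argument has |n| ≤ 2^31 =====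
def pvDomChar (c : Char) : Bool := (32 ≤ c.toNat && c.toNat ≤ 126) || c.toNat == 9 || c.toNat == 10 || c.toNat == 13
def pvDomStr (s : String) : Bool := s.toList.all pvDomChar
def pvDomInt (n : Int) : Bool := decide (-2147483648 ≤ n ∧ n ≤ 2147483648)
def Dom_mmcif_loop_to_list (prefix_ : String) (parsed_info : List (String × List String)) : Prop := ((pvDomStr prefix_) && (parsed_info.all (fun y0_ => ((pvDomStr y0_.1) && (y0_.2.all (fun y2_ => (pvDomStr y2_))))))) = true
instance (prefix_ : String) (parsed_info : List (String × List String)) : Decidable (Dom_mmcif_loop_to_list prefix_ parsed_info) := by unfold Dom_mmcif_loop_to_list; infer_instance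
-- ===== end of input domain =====

-- B replaces A's row-major `zip(*data)` transpose with column-major mutation of preallocated row dicts; same scanning loop and assert.

-- ===== PORT A =====

-- zip(*data): rows of heads while every list is nonempty (zip truncates at the shortest); fuel = length of the first list suffices
def pyZipStarGo (fuel : Nat) (xss : List (List String)) : List (List String) :=
  match fuel with
  | 0 => []
  | n + 1 =>
    if xss.any (·.isEmpty) then []
    else (xss.map (fun xs => xs.headD "")) :: pyZipStarGo n (xss.map (·.tail))

def pyZipStar (xss : List (List String)) : List (List String) :=
  match xss with
  | [] => []
  | x :: _ => pyZipStarGo x.length xss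

def mmcif_loop_to_list (prefix_ : String) (parsed_info : List (String × List String)) : List (List (String × String)) :=
  let cd := parsed_info.foldl
    (fun cd kv => if PySem.Str.startswith kv.1 prefix_ then (cd.1 ++ [kv.1], cd.2 ++ [kv.2]) else cd)
    ([], [])
  let cols := cd.1
  let data := cd.2
  -- the assert raises exactly when some matching column has a different length: excluded by Pre_
  (pyZipStar data).map (fun xs => (PySem.Dict.ofList (cols.zip xs)).items)

-- ===== PORT B =====
def mmcif_loop_to_list_alt (prefix_ : String) (parsed_info : List (String × List String)) : List (List (String × String)) :=
  let cd := parsed_info.foldl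
    (fun cd kv => if PySem.Str.startswith kv.1 prefix_ then (cd.1 ++ [kv.1], cd.2 ++ [kv.2]) else cd)
    ([], [])
  let cols := cd.1
  let data := cd.2
  match data with
  | [] => []
  | d0 :: _ =>
    let result : List (PySem.Dict String String) := List.replicate d0.length PySem.Dict.empty
    let result := (cols.zip data).foldl
      (fun res cv => (res.zip cv.2).map (fun dv => dv.1.insert cv.1 dv.2)) result
    result.map (·.items)

-- ===== PRECONDITION & SPEC =====
-- Pre_ excludes (a) inputs whose matching columns have unequal lengths, where A's assert raises AssertionError, and
-- (b) association lists with duplicate keys, which cannot arise from the Python dict A receives, so A's behaviour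
-- there is an artefact of the list encoding of the dict.
def Pre_mmcif_loop_to_list (prefix_ : String) (parsed_info : List (String × List String)) : Prop :=
  (parsed_info.map Prod.fst).Nodup ∧
  ∀ p ∈ parsed_info, PySem.Str.startswith p.1 prefix_ = true →
    p.2.length = ((parsed_info.filter (fun q => PySem.Str.startswith q.1 prefix_)).headD ("", [])).2.length

instance (prefix_ : String) (parsed_info : List (String × List String)) : Decidable (Pre_mmcif_loop_to_list prefix_ parsed_info) := by unfold Pre_mmcif_loop_to_list; infer_instance

def pvWitness_mmcif_loop_to_list : String × (List (String × List String)) :=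
  ("_e.", [("_e.num", ["1", "2"]), ("_e.id", ["a", "b"]), ("other", ["x"])])

def Spec_mmcif_loop_to_list (prefix_ : String) (parsed_info : List (String × List String)) (out : List (List (String × String))) : Prop := out = mmcif_loop_to_list_alt prefix_ parsed_info
instance (prefix_ : String) (parsed_info : List (String × List String)) (out : List (List (String × String))) : Decidable (Spec_mmcif_loop_to_list prefix_ parsed_info out) := by unfold Spec_mmcif_loop_to_list; infer_instance

-- ===== CLAIM (what is proved, stated in full; the proofs are below) =====
def Claim_equal_mmcif_loop_to_list : Prop := ∀ (prefix_ : String) (parsed_info : List (String × List String)), Dom_mmcif_loop_to_list prefix_ parsed_info → Pre_mmcif_loop_to_list prefix_ parsed_info → Spec_mmcif_loop_to_list prefix_ parsed_info (mmcif_loop_to_list prefix_ parsed_info)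

-- ===== LEMMAS AND PROOFS =====

-- the shared scanning loop is filter + two projections
theorem pv_scan (prefix_ : String) (pi : List (String × List String)) :
    ∀ c d, pi.foldl (fun cd kv => if PySem.Str.startswith kv.1 prefix_ then (cd.1 ++ [kv.1], cd.2 ++ [kv.2]) else cd) (c, d)
      = (c ++ (pi.filter (fun q => PySem.Str.startswith q.1 prefix_)).map Prod.fst,
         d ++ (pi.filter (fun q => PySem.Str.startswith q.1 prefix_)).map Prod.snd) := by
  induction pi with
  | nil => simp
  | cons p t ih =>
    intro c d
    rw [List.foldl_cons, List.filter_cons]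
    by_cases hm : PySem.Str.startswith p.1 prefix_ = true
    · rw [if_pos hm, if_pos hm, ih]
      simp
    · rw [if_neg hm, if_neg hm, ih]

theorem pv_zipStarGo (n : Nat) : ∀ (xss : List (List String)), (∀ xs ∈ xss, xs.length = n) →
    pyZipStarGo n xss = (List.range n).map (fun i => xss.map (fun xs => xs.getD i "")) := by
  induction n with
  | zero => intro xss _; simp [pyZipStarGo]
  | succ n ih =>
    intro xss h
    have hne : xss.any (·.isEmpty) = false := by
      simp only [List.any_eq_false]
      intro xs hxs
      have hx := h xs hxs
      cases xs with
      | nil => simp at hx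
      | cons a t => simp
    have htl : ∀ xs ∈ xss.map (·.tail), xs.length = n := by
      intro xs hxs
      simp only [List.mem_map] at hxs
      obtain ⟨ys, hy, rfl⟩ := hxs
      have hx := h ys hy
      cases ys with
      | nil => simp at hx
      | cons a t => simp at hx ⊢; omega
    rw [pyZipStarGo, hne]
    simp only [Bool.false_eq_true, if_false]
    rw [ih (xss.map (·.tail)) htl, List.range_succ_eq_map, List.map_cons, List.map_map]
    refine congrArg₂ List.cons ?_ ?_
    · exact List.map_congr_left (fun xs _ => by cases xs <;> simp)
    · apply List.map_congr_left
      intro i _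
      simp only [Function.comp, List.map_map]
      exact List.map_congr_left (fun xs _ => by cases xs <;> simp)

-- a column step over rows of matching length, read off pointwise
theorem pv_bfold (M : List (String × List String)) :
    ∀ (res : List (PySem.Dict String String)), (∀ q ∈ M, q.2.length = res.length) →
    M.foldl (fun res cv => (res.zip cv.2).map (fun dv => dv.1.insert cv.1 dv.2)) res
      = (List.range res.length).map
          (fun i => M.foldl (fun d q => d.insert q.1 (q.2.getD i "")) (res.getD i PySem.Dict.empty)) := by
  induction M with
  | nil =>
    intro res _
    simp only [List.foldl_nil]
    apply List.ext_getElem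
    · simp
    · intro i h1 h2
      simp only [List.length_map, List.length_range] at h2
      simp [List.getD_eq_getElem?_getD, List.getElem?_eq_getElem h2]
  | cons q M ih =>
    intro res h
    have hq : q.2.length = res.length := h q (by simp)
    have hstep : ((res.zip q.2).map (fun dv => dv.1.insert q.1 dv.2)).length = res.length := by
      simp [hq]
    rw [List.foldl_cons, ih _ (by intro p hp; rw [hstep]; exact h p (by simp [hp])), hstep]
    apply List.map_congr_left
    intro i hi
    simp only [List.mem_range] at hi
    rw [List.foldl_cons]
    congr 1
    have h2 : i < q.2.length := by omega
    simp [List.getD_eq_getElem?_getD, hi, h2]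

theorem pv_getD_replicate (n i : Nat) :
    (List.replicate n (PySem.Dict.empty : PySem.Dict String String)).getD i PySem.Dict.empty = PySem.Dict.empty := by
  simp [List.getD_eq_getElem?_getD, List.getElem?_replicate]
  split <;> simp

-- ===== VERDICT (by name: the statement is the Claim_ definition above) =====
theorem mmcif_loop_to_list_spec : Claim_equal_mmcif_loop_to_list := by
  intro prefix_ pi _ hpre
  obtain ⟨-, hlen⟩ := hpre
  show mmcif_loop_to_list prefix_ pi = mmcif_loop_to_list_alt prefix_ pi
  unfold mmcif_loop_to_list mmcif_loop_to_list_alt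
  rw [pv_scan prefix_ pi [] []]
  simp only [List.nil_append]
  set L : List (String × List String) := pi.filter (fun q => PySem.Str.startswith q.1 prefix_) with hL
  have hmemL : ∀ p ∈ L, p.2.length = (L.headD ("", [])).2.length := by
    intro p hp
    rw [hL, List.mem_filter] at hp
    exact hlen p hp.1 hp.2
  cases hLc : L with
  | nil => simp [pyZipStar]
  | cons p0 L' =>
    simp only [List.map_cons]
    have hcols : ∀ xs ∈ p0.2 :: L'.map Prod.snd, xs.length = p0.2.length := by
      intro xs hxs
      rw [show p0.2 :: L'.map Prod.snd = (p0 :: L').map Prod.snd from rfl, List.mem_map] at hxs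
      obtain ⟨p, hp, rfl⟩ := hxs
      have := hmemL p (hLc ▸ hp)
      rw [hLc] at this
      simpa using this
    -- zip of the two projections is the list itself
    have hzip : (p0.1 :: L'.map Prod.fst).zip (p0.2 :: L'.map Prod.snd) = p0 :: L' := by
      rw [show p0.2 :: L'.map Prod.snd = (p0 :: L').map Prod.snd from rfl,
          show p0.1 :: L'.map Prod.fst = (p0 :: L').map Prod.fst from rfl,
          List.zip_map']
      simp
    rw [hzip]
    -- A side: zip(*data) is the indexed transpose
    rw [show pyZipStar (p0.2 :: L'.map Prod.snd) = pyZipStarGo p0.2.length (p0.2 :: L'.map Prod.snd) from rfl,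
        pv_zipStarGo p0.2.length _ hcols]
    -- B side: the column-major fold, read off pointwise
    rw [pv_bfold (p0 :: L') (List.replicate p0.2.length PySem.Dict.empty)
          (by rw [List.length_replicate]
              intro q hq
              have := hmemL q (hLc ▸ hq)
              rw [hLc] at this
              simpa using this),
        List.length_replicate]
    rw [List.map_map, List.map_map]
    apply List.map_congr_left
    intro i hi
    simp only [Function.comp_apply]
    rw [pv_getD_replicate]
    -- dict(zip(cols, row_i)) is the very same insert fold over the columns
    congr 1
    rw [show (p0.1 :: L'.map Prod.fst).zip ((p0.2 :: L'.map Prod.snd).map (fun xs => xs.getD i ""))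
          = ((p0 :: L').map Prod.fst).zip (((p0 :: L').map Prod.snd).map (fun xs => xs.getD i "")) from rfl,
        List.map_map, List.zip_map']
    simp only [Function.comp_apply]
    rw [show (PySem.Dict.ofList ((p0 :: L').map (fun p => (p.1, (p.2.getD i "" : String)))))
          = ((p0 :: L').map (fun p => (p.1, p.2.getD i ""))).foldl (fun d kv => d.insert kv.1 kv.2) PySem.Dict.empty from rfl,
        List.foldl_map]
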